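-- pv_equiv track=rewrite | github.com/Roychowdhury-group/FENESTRA-Fake-News-Structure-and-Threat-Assessment | code/relation_extraction/utility_functions.py | change_nt_to_not
-- ===== SOURCE A (Python) =====
-- def change_nt_to_not(sent):
--     sent = sent.replace(" can't ", " cannot ").replace(" won't ", " will not ")
--     res_sent = ""
--     ind = 0
--     while ind < len(sent):
--         # current character
--         c = sent[ind]
--         # avoid out of range access.
--         if ind > len(sent)-3:
--             res_sent += c
--             ind += 1
--             continue
--         # n't at the end of the sentence.
--         if ind == len(sent)-3 and c == "n" and sent[ind+1] == "'" and sent[ind+2] == "t":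
--             res_sent += " not"
--             break
--         if ind == len(sent)-4 and c == "n" and sent[ind+1] == "'" and sent[ind+2] == "t":
--             res_sent += " not" + sent[ind+3]
--             break
--         if c == "n" and sent[ind+1] == "'" and sent[ind+2] == "t" and sent[ind+3] == " ":
--             res_sent += " not "
--             ind += 4
--             continue
--         if c == "n" and sent[ind+1] == "'" and sent[ind+2] == "t" and sent[ind+3] == ".":
--             res_sent += " not."
--             ind += 4
--             continue
--         res_sent += c
--         ind += 1
--     return res_sent
-- ===== SOURCE B (Python) =====
-- def change_nt_to_not(sent):
--     sent = sent.replace(" can't ", " cannot ").replace(" won't ", " will not ")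
--
--     def go(s):
--         i = s.find("n't")
--         if i < 0:
--             return s
--         rest = s[i + 3:]
--         if len(rest) <= 1 or rest[0] in " .":
--             return s[:i] + " not" + go(rest)
--         return s[:i + 3] + go(rest)
--
--     return go(sent)
-- ===== Notes on version B (the rewrite author's own statement) =====
-- stated objective: faster
-- what changed: Replaced the character-by-character index/accumulator state machine (which rebuilds the result string by repeated += concatenation) with a recursion that jumps directly between occurrences of the contraction via str.find and slicing, deciding each occurrence by the suffix that follows it.
import Mathlib
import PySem

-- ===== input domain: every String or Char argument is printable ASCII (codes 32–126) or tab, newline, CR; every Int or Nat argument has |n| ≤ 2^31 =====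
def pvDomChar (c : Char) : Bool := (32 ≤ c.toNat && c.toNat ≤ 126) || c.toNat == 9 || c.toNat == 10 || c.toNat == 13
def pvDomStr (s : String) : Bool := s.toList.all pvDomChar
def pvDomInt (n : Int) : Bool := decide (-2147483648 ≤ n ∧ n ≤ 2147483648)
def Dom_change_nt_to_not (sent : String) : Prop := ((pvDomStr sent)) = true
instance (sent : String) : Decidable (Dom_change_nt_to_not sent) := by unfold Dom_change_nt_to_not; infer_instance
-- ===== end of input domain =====

-- B replaces A's character-by-character index/accumulator state machine (quadratic += string
-- building) by a recursion that jumps between occurrences via str.find and slicing (objective: faster).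

-- ===== PORT A =====
-- A's while-loop: state = (res_sent, ind); string indexing sent[i] is in range at every access
-- (guarded by the branch conditions), so List.getD is exact here.
def pvALoop (cs : List Char) (res : List Char) (ind : Nat) : List Char :=
  if _h : ind < cs.length then
    let c := cs.getD ind ' '
    if cs.length < ind + 3 then
      pvALoop cs (res ++ [c]) (ind + 1)
    else if ind + 3 = cs.length ∧ c = 'n' ∧ cs.getD (ind+1) ' ' = '\'' ∧ cs.getD (ind+2) ' ' = 't' then
      res ++ " not".toList
    else if ind + 4 = cs.length ∧ c = 'n' ∧ cs.getD (ind+1) ' ' = '\'' ∧ cs.getD (ind+2) ' ' = 't' then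
      res ++ " not".toList ++ [cs.getD (ind+3) ' ']
    else if c = 'n' ∧ cs.getD (ind+1) ' ' = '\'' ∧ cs.getD (ind+2) ' ' = 't' ∧ cs.getD (ind+3) ' ' = ' ' then
      pvALoop cs (res ++ " not ".toList) (ind + 4)
    else if c = 'n' ∧ cs.getD (ind+1) ' ' = '\'' ∧ cs.getD (ind+2) ' ' = 't' ∧ cs.getD (ind+3) ' ' = '.' then
      pvALoop cs (res ++ " not.".toList) (ind + 4)
    else
      pvALoop cs (res ++ [c]) (ind + 1)
  else res
termination_by cs.length - ind

def change_nt_to_not (sent : String) : String :=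
  let s := PySem.Str.replace (PySem.Str.replace sent " can't " " cannot ") " won't " " will not "
  String.ofList (pvALoop s.toList [] 0)

-- ===== PORT B =====
-- Source B's go: find the first "n't" (PySem.Chars.find = str.find); s[:i] / s[i+3:] are
-- List.take / List.drop since i ≥ 0 in the branch taken (exact for nonnegative slice bounds).
def pvBGo (s : List Char) : List Char :=
  let i := PySem.Chars.find s ['n', '\'', 't']
  if _h : i < 0 then s
  else
    let rest := s.drop (i.toNat + 3)
    if rest.length ≤ 1 ∨ rest.getD 0 ' ' = ' ' ∨ rest.getD 0 ' ' = '.' then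
      s.take i.toNat ++ " not".toList ++ pvBGo rest
    else
      s.take (i.toNat + 3) ++ pvBGo rest
termination_by s.length
decreasing_by
  all_goals
    simp only [List.length_drop]
    have h0 : (0:Int) ≤ PySem.Chars.find s ['n', '\'', 't'] := by omega
    have h1 : ['n', '\'', 't'] <:+: s := (PySem.Chars.find_nonneg_iff _ _).mp h0
    have h2 := h1.length_le
    simp at h2
    omega

def change_nt_to_not_alt (sent : String) : String :=
  let s := PySem.Str.replace (PySem.Str.replace sent " can't " " cannot ") " won't " " will not "
  String.ofList (pvBGo s.toList)

-- ===== PRECONDITION & SPEC =====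
def Spec_change_nt_to_not (sent : String) (out : String) : Prop := out = change_nt_to_not_alt sent
instance (sent : String) (out : String) : Decidable (Spec_change_nt_to_not sent out) := by unfold Spec_change_nt_to_not; infer_instance

-- ===== CLAIM (what is proved, stated in full; the proofs are below) =====
def Claim_equal_change_nt_to_not : Prop := ∀ (sent : String), Dom_change_nt_to_not sent → Spec_change_nt_to_not sent (change_nt_to_not sent)

-- ===== LEMMAS AND PROOFS =====

-- the common characterization: a direct structural recursion over the suffix
def pvF : List Char → List Char
  | [] => []
  | c :: rest =>
    if c = 'n' ∧ rest.getD 0 ' ' = '\'' ∧ rest.getD 1 ' ' = 't' ∧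
       (rest.length ≤ 3 ∨ rest.getD 2 ' ' = ' ' ∨ rest.getD 2 ' ' = '.') then
      " not".toList ++ pvF (rest.drop 2)
    else
      c :: pvF rest
termination_by l => l.length
decreasing_by
  all_goals simp only [List.length_drop, List.length_cons]; omega

lemma pv_getD_drop (l : List Char) (i k : Nat) (d : Char) :
    (l.drop i).getD k d = l.getD (i + k) d := by
  simp [List.getD, List.getElem?_drop]

lemma pv_cond_prefix (c : Char) (rest : List Char)
    (h : c = 'n' ∧ rest.getD 0 ' ' = '\'' ∧ rest.getD 1 ' ' = 't') :
    ['n', '\'', 't'] <+: (c :: rest) := by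
  obtain ⟨h1, h2, h3⟩ := h
  match rest with
  | [] => simp [List.getD] at h2
  | [x] => simp [List.getD] at h3
  | x :: y :: r =>
    simp [List.getD] at h2 h3
    subst h1 h2 h3
    exact ⟨r, rfl⟩

lemma pv_drop_cons (cs : List Char) (i : Nat) (h : i < cs.length) :
    cs.drop i = cs.getD i ' ' :: cs.drop (i + 1) := by
  rw [List.getD_eq_getElem cs ' ' h]
  exact (List.getElem_cons_drop h).symm

lemma pv_f_cons_ne (c : Char) (rest : List Char) (h : ¬ c = 'n') :
    pvF (c :: rest) = c :: pvF rest := by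
  rw [pvF, if_neg]
  exact fun hc => h hc.1

lemma pv_f_single (x : Char) : pvF [x] = [x] := by
  rw [pvF, if_neg, pvF]
  intro hc
  simp [List.getD] at hc

-- A's loop computes pvF of the remaining suffix
lemma pv_aLoop_eq_f_aux :
    ∀ (n : Nat) (cs res : List Char) (ind : Nat), cs.length - ind ≤ n →
      pvALoop cs res ind = res ++ pvF (cs.drop ind) := by
  intro n
  induction n with
  | zero =>
    intro cs res ind hn
    have hind : ¬ ind < cs.length := by omega
    rw [pvALoop, dif_neg hind, List.drop_eq_nil_of_le (by omega), pvF]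
    simp
  | succ n ih =>
    intro cs res ind hn
    by_cases hind : ind < cs.length
    swap
    · rw [pvALoop, dif_neg hind, List.drop_eq_nil_of_le (by omega), pvF]
      simp
    rw [pvALoop, dif_pos hind]
    simp only []
    have hdrop : cs.drop ind = cs.getD ind ' ' :: cs.drop (ind + 1) := pv_drop_cons cs ind hind
    have hg1 : (cs.drop (ind + 1)).getD 0 ' ' = cs.getD (ind + 1) ' ' := by
      simp
    have hg2 : (cs.drop (ind + 1)).getD 1 ' ' = cs.getD (ind + 2) ' ' := by
      simp
    have hg3 : (cs.drop (ind + 1)).getD 2 ' ' = cs.getD (ind + 3) ' ' := by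
      rw [pv_getD_drop]
    have hdd : (cs.drop (ind + 1)).drop 2 = cs.drop (ind + 3) := by
      rw [List.drop_drop]
    have hfc : pvF (cs.drop ind) =
        if cs.getD ind ' ' = 'n' ∧ cs.getD (ind + 1) ' ' = '\'' ∧ cs.getD (ind + 2) ' ' = 't' ∧
           (cs.length - (ind + 1) ≤ 3 ∨ cs.getD (ind + 3) ' ' = ' ' ∨ cs.getD (ind + 3) ' ' = '.')
        then " not".toList ++ pvF (cs.drop (ind + 3))
        else cs.getD ind ' ' :: pvF (cs.drop (ind + 1)) := by
      rw [hdrop, pvF, hg1, hg2, hg3, hdd, List.length_drop]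
    by_cases hb1 : cs.length < ind + 3
    · rw [if_pos hb1, ih cs _ (ind + 1) (by omega), hfc, if_neg]
      · simp
      · rintro ⟨-, h2, h3, -⟩
        by_cases hsmall : cs.length ≤ ind + 1
        · rw [List.getD_eq_default cs ' ' hsmall] at h2
          exact absurd h2 (by decide)
        · rw [List.getD_eq_default cs ' ' (by omega)] at h3
          exact absurd h3 (by decide)
    rw [if_neg hb1]
    by_cases hb2 : ind + 3 = cs.length ∧ cs.getD ind ' ' = 'n' ∧ cs.getD (ind + 1) ' ' = '\'' ∧ cs.getD (ind + 2) ' ' = 't'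
    · rw [if_pos hb2, hfc, if_pos ⟨hb2.2.1, hb2.2.2.1, hb2.2.2.2, Or.inl (by omega)⟩,
        List.drop_eq_nil_of_le (by omega), pvF]
      simp
    rw [if_neg hb2]
    by_cases hb3 : ind + 4 = cs.length ∧ cs.getD ind ' ' = 'n' ∧ cs.getD (ind + 1) ' ' = '\'' ∧ cs.getD (ind + 2) ' ' = 't'
    · rw [if_pos hb3, hfc, if_pos ⟨hb3.2.1, hb3.2.2.1, hb3.2.2.2, Or.inl (by omega)⟩,
        pv_drop_cons cs (ind + 3) (by omega), List.drop_eq_nil_of_le (by omega), pv_f_single]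
      simp
    rw [if_neg hb3]
    by_cases hb4 : cs.getD ind ' ' = 'n' ∧ cs.getD (ind + 1) ' ' = '\'' ∧ cs.getD (ind + 2) ' ' = 't' ∧ cs.getD (ind + 3) ' ' = ' '
    · have hne3 : ind + 3 ≠ cs.length := fun he => hb2 ⟨he, hb4.1, hb4.2.1, hb4.2.2.1⟩
      rw [if_pos hb4, ih cs _ (ind + 4) (by omega), hfc,
        if_pos ⟨hb4.1, hb4.2.1, hb4.2.2.1, Or.inr (Or.inl hb4.2.2.2)⟩,
        pv_drop_cons cs (ind + 3) (by omega), hb4.2.2.2,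
        pv_f_cons_ne ' ' _ (by decide)]
      simp
    rw [if_neg hb4]
    by_cases hb5 : cs.getD ind ' ' = 'n' ∧ cs.getD (ind + 1) ' ' = '\'' ∧ cs.getD (ind + 2) ' ' = 't' ∧ cs.getD (ind + 3) ' ' = '.'
    · have hne3 : ind + 3 ≠ cs.length := fun he => hb2 ⟨he, hb5.1, hb5.2.1, hb5.2.2.1⟩
      rw [if_pos hb5, ih cs _ (ind + 4) (by omega), hfc,
        if_pos ⟨hb5.1, hb5.2.1, hb5.2.2.1, Or.inr (Or.inr hb5.2.2.2)⟩,
        pv_drop_cons cs (ind + 3) (by omega), hb5.2.2.2,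
        pv_f_cons_ne '.' _ (by decide)]
      simp
    rw [if_neg hb5, ih cs _ (ind + 1) (by omega), hfc, if_neg]
    · simp
    · rintro ⟨h1, h2, h3, h4⟩
      rcases h4 with h4 | h4 | h4
      · have : ind + 3 = cs.length ∨ ind + 4 = cs.length := by omega
        rcases this with he | he
        · exact hb2 ⟨he, h1, h2, h3⟩
        · exact hb3 ⟨he, h1, h2, h3⟩
      · exact hb4 ⟨h1, h2, h3, h4⟩
      · exact hb5 ⟨h1, h2, h3, h4⟩

lemma pv_aLoop_eq_f (cs : List Char) (res : List Char) (ind : Nat) :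
    pvALoop cs res ind = res ++ pvF (cs.drop ind) :=
  pv_aLoop_eq_f_aux (cs.length - ind) cs res ind le_rfl

-- pvF copies a string with no occurrence
lemma pv_f_no_occ (s : List Char) (h : ¬ ['n', '\'', 't'] <:+: s) : pvF s = s := by
  induction s with
  | nil => rw [pvF]
  | cons c rest ih =>
    rw [pvF, if_neg]
    · rw [ih (fun hi => h (hi.trans (List.suffix_cons c rest).isInfix))]
    · intro hc
      exact h ((pv_cond_prefix c rest ⟨hc.1, hc.2.1, hc.2.2.1⟩).isInfix)

-- pvF copies verbatim up to the first possible occurrence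
lemma pv_f_skip (k : Nat) (s : List Char) (hk : k ≤ s.length)
    (h : ∀ j < k, ¬ ['n', '\'', 't'] <+: s.drop j) :
    pvF s = s.take k ++ pvF (s.drop k) := by
  induction k generalizing s with
  | zero => simp
  | succ k ih =>
    match s, hk with
    | c :: rest, hk =>
      have h0 : ¬ ['n', '\'', 't'] <+: (c :: rest) := by simpa using h 0 (by omega)
      rw [pvF, if_neg]
      · rw [ih rest (by simpa using hk) (fun j hj => by simpa using h (j+1) (by omega))]
        simp
      · intro hc
        exact h0 (pv_cond_prefix c rest ⟨hc.1, hc.2.1, hc.2.2.1⟩)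

-- B's recursion computes pvF
lemma pv_bGo_eq_f_aux : ∀ (n : Nat) (s : List Char), s.length ≤ n → pvBGo s = pvF s := by
  intro n
  induction n with
  | zero =>
    intro s hs
    have : s = [] := List.eq_nil_of_length_eq_zero (by omega)
    subst this
    rw [pvBGo, pvF]
    rw [dif_pos (by decide)]
  | succ n ih =>
    intro s hs
    rw [pvBGo]
    by_cases hi : PySem.Chars.find s ['n', '\'', 't'] < 0
    · rw [dif_pos hi]
      have hne : PySem.Chars.find s ['n', '\'', 't'] = -1 := by
        have := PySem.Chars.neg_one_le_find s ['n', '\'', 't']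
        omega
      exact (pv_f_no_occ s ((PySem.Chars.find_eq_neg_one_iff _ _).mp hne)).symm
    · rw [dif_neg hi]
      have h0 : (0:Int) ≤ PySem.Chars.find s ['n', '\'', 't'] := by omega
      obtain ⟨hpre, hmin⟩ := PySem.Chars.find_spec (s := s) (sub := ['n', '\'', 't']) h0
      set k := (PySem.Chars.find s ['n', '\'', 't']).toNat with hkdef
      have hkle : k ≤ s.length := by
        have := PySem.Chars.find_le_length s ['n', '\'', 't']
        omega
      obtain ⟨r, hr⟩ := hpre
      have hlen3 : k + 3 ≤ s.length := by
        have : (s.drop k).length = 3 + r.length := by rw [← hr]; simp; omega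
        simp at this
        omega
      have hrest : s.drop (k + 3) = r := by
        have : (s.drop k).drop 3 = r := by rw [← hr]; simp
        simpa [List.drop_drop, Nat.add_comm] using this
      have hdk : s.drop k = 'n' :: '\'' :: 't' :: s.drop (k + 3) := by
        rw [hrest, ← hr]
        rfl
      have hf : pvF s = s.take k ++ pvF (s.drop k) :=
        pv_f_skip k s hkle hmin
      have hrlen : (s.drop (k + 3)).length ≤ n := by
        rw [List.length_drop]
        omega
      by_cases hc : (s.drop (k+3)).length ≤ 1 ∨ (s.drop (k+3)).getD 0 ' ' = ' ' ∨ (s.drop (k+3)).getD 0 ' ' = '.'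
      · rw [if_pos hc, hf, hdk, pvF, if_pos]
        · rw [ih _ hrlen]
          simp
        · refine ⟨rfl, by simp [List.getD], by simp [List.getD], ?_⟩
          rcases hc with h1 | h2 | h3
          · exact Or.inl (by simp only [List.length_cons]; omega)
          · exact Or.inr (Or.inl (by simpa [List.getD] using h2))
          · exact Or.inr (Or.inr (by simpa [List.getD] using h3))
      · simp only [not_or] at hc
        obtain ⟨hc1, hc2, hc3⟩ := hc
        rw [if_neg (by simp only [not_or]; exact ⟨hc1, hc2, hc3⟩), hf, hdk]
        rw [pvF, if_neg]
        · rw [pvF, if_neg (by simp), pvF, if_neg (by simp)]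
          rw [ih _ hrlen]
          have htake : s.take (k + 3) = s.take k ++ ['n', '\'', 't'] := by
            have h3 : (3:Nat) ≤ (s.drop k).length := by simp; omega
            rw [List.take_add, hdk]
            rfl
          simp [htake]
        · intro hcond
          rcases hcond.2.2.2 with h1 | h2 | h3
          · simp only [List.length_cons, List.length_drop] at h1
            simp only [List.length_drop] at hc1
            omega
          · exact hc2 (by simpa [List.getD] using h2)
          · exact hc3 (by simpa [List.getD] using h3)

lemma pv_bGo_eq_f (s : List Char) : pvBGo s = pvF s :=
  pv_bGo_eq_f_aux s.length s le_rfl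

-- ===== VERDICT (by name: the statement is the Claim_ definition above) =====
theorem change_nt_to_not_spec : Claim_equal_change_nt_to_not := by
  intro sent _
  show _ = _
  unfold change_nt_to_not change_nt_to_not_alt
  simp only [pv_aLoop_eq_f, pv_bGo_eq_f, List.drop_zero, List.nil_append]
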